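-- pv_equiv track=rewrite | github.com/kiddulu916/bug-bounty-framework | bbf/stages/test.py | _group_vulnerabilities_by_type
-- ===== SOURCE A (Python) =====
-- from typing import Dict, Any, List, Optional, Set
--
-- def _group_vulnerabilities_by_type(vulnerabilities: List[Dict[str, Any]]) -> Dict[str, List[Dict[str, Any]]]:
--     """
--     Group vulnerabilities by their type.
--
--     Args:
--         vulnerabilities: List of vulnerability dictionaries
--
--     Returns:
--         Dictionary mapping vulnerability types to lists of vulnerabilities
--     """
--     vulns_by_type = {}
--
--     for vuln in vulnerabilities:
--         vuln_type = vuln.get('type', 'unknown').lower()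
--         if vuln_type not in vulns_by_type:
--             vulns_by_type[vuln_type] = []
--         vulns_by_type[vuln_type].append(vuln)
--
--     return vulns_by_type
-- ===== SOURCE B (Python) =====
-- def _group_vulnerabilities_by_type(vulnerabilities):
--     """Group vulnerabilities by lowercased 'type': collect the distinct type
--     keys in first-appearance order, then build each group with one filter pass
--     per key (dict-comprehension), instead of single-pass dict accumulation."""
--     k = lambda v: v.get('type', 'unknown').lower()
--     types = list(dict.fromkeys(map(k, vulnerabilities)))
--     return {t: [v for v in vulnerabilities if k(v) == t] for t in types}
-- ===== Notes on version B (the rewrite author's own statement) =====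
-- stated objective: alternative
-- what changed: Replaces the single-pass mutable-dict accumulation with a two-phase scheme: first dedup the mapped type keys in first-appearance order, then build each group by an independent filter pass over the input (dict comprehension).
import Mathlib
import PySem

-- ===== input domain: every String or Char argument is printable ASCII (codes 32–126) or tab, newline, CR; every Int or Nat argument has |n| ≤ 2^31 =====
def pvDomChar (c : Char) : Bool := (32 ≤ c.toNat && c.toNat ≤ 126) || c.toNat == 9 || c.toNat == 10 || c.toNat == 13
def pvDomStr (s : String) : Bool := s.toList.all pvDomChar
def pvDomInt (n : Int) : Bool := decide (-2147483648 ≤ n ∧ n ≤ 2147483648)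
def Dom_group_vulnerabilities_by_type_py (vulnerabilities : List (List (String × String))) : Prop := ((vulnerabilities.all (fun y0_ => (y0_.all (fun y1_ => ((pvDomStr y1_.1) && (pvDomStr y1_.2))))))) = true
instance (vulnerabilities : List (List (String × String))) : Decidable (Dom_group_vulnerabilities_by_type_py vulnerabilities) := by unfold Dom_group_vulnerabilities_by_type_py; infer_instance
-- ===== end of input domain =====

-- B groups by collecting the distinct lowercased type keys first and then building each
-- group with an independent filter pass, instead of A's single-pass dict accumulation
-- (objective: alternative, same results).

-- shared key expression: vuln.get('type', 'unknown').lower()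
def pvKey (v : List (String × String)) : String :=
  PySem.Str.lower ((PySem.Dict.mk v).getD "type" "unknown")

-- ===== PORT A =====
def group_vulnerabilities_by_type_py (vulnerabilities : List (List (String × String))) : List (String × List (List (String × String))) :=
  (vulnerabilities.foldl
    (fun (d : PySem.Dict String (List (List (String × String)))) vuln =>
      let t := pvKey vuln
      let d' := if d.contains t = false then d.insert t [] else d
      d'.modify t [] (· ++ [vuln]))
    PySem.Dict.empty).items

-- ===== PORT B =====
def group_vulnerabilities_by_type_py_alt (vulnerabilities : List (List (String × String))) : List (String × List (List (String × String))) :=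
  (PySem.List.dedup (vulnerabilities.map pvKey)).map
    (fun t => (t, vulnerabilities.filter (fun v => pvKey v == t)))

-- ===== PRECONDITION & SPEC =====
def Spec_group_vulnerabilities_by_type_py (vulnerabilities : List (List (String × String))) (out : List (String × List (List (String × String)))) : Prop := out = group_vulnerabilities_by_type_py_alt vulnerabilities
instance (vulnerabilities : List (List (String × String))) (out : List (String × List (List (String × String)))) : Decidable (Spec_group_vulnerabilities_by_type_py vulnerabilities out) := by unfold Spec_group_vulnerabilities_by_type_py; infer_instance

-- ===== CLAIM (what is proved, stated in full; the proofs are below) =====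
def Claim_equal_group_vulnerabilities_by_type_py : Prop := ∀ (vulnerabilities : List (List (String × String))), Dom_group_vulnerabilities_by_type_py vulnerabilities → Spec_group_vulnerabilities_by_type_py vulnerabilities (group_vulnerabilities_by_type_py vulnerabilities)

-- ===== LEMMAS AND PROOFS =====

-- A's loop body ('if missing: d[t]=[]' then append) is exactly 'd.modify t [] (· ++ [vuln])'
lemma pv_step_eq (d : PySem.Dict String (List (List (String × String)))) (v : List (String × String)) :
    (let t := pvKey v
     let d' := if d.contains t = false then d.insert t [] else d
     d'.modify t [] (· ++ [v]))
      = d.modify (pvKey v) [] (· ++ [v]) := by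
  by_cases h : d.contains (pvKey v) = false
  · simp [h, PySem.Dict.modify, PySem.Dict.insert_insert_self,
      PySem.Dict.getD_of_not_contains d [] h]
  · simp [h]

lemma pv_main (vulnerabilities : List (List (String × String))) :
    group_vulnerabilities_by_type_py vulnerabilities
      = group_vulnerabilities_by_type_py_alt vulnerabilities := by
  unfold group_vulnerabilities_by_type_py group_vulnerabilities_by_type_py_alt
  have hstep :
      (fun (d : PySem.Dict String (List (List (String × String)))) vuln =>
        let t := pvKey vuln
        let d' := if d.contains t = false then d.insert t [] else d
        d'.modify t [] (· ++ [vuln]))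
      = (fun d vuln => d.modify (pvKey vuln) [] (· ++ [vuln])) := by
    funext d v; exact pv_step_eq d v
  rw [hstep]
  have hmap :
      vulnerabilities.foldl (fun d vuln => d.modify (pvKey vuln) [] (· ++ [vuln])) PySem.Dict.empty
      = (vulnerabilities.map (fun v => (pvKey v, v))).foldl
          (fun d p => d.modify p.1 [] (· ++ [p.2])) PySem.Dict.empty := by
    rw [List.foldl_map]
  rw [hmap]
  set l := vulnerabilities.map (fun v => (pvKey v, v)) with hl
  have hnd : ((l.foldl (fun d p => d.modify p.1 [] (· ++ [p.2])) PySem.Dict.empty).keys).Nodup := by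
    exact PySem.Dict.nodup_keys_foldl_modify_key l Prod.fst [] (fun d p => (· ++ [p.2]))
      PySem.Dict.empty (by simp)
  rw [PySem.Dict.items_eq_map_keys _ hnd []]
  have hkeys : (l.foldl (fun d p => d.modify p.1 [] (· ++ [p.2])) PySem.Dict.empty).keys
      = PySem.List.dedup (vulnerabilities.map pvKey) := by
    rw [PySem.Dict.keys_foldl_modify_key l Prod.fst [] (fun d p => (· ++ [p.2]))]
    simp [PySem.Set.update, PySem.Set.ofList, PySem.Dict.keys_empty, hl,
      List.map_map, Function.comp_def]
  rw [hkeys]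
  apply List.map_congr_left
  intro t _
  congr 1
  rw [PySem.Dict.getD_foldl_modify_append]
  simp [hl, PySem.Dict.getD_empty, List.filter_map, Function.comp_def, List.map_map]

-- ===== VERDICT (by name: the statement is the Claim_ definition above) =====
theorem group_vulnerabilities_by_type_py_spec : Claim_equal_group_vulnerabilities_by_type_py := by
  intro vulns _
  unfold Spec_group_vulnerabilities_by_type_py
  exact pv_main vulns
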